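-- pv_equiv track=rewrite | github.com/julia0926/TIL_Algo | Study/KAKAO/Level2/2020_BLIND_괄호변환.py | solution
-- ===== SOURCE A (Python) =====
-- def divide(p):
--     left_cnt, right_cnt = 0, 0
--     for idx, value in enumerate(p):
--         if value == "(": left_cnt += 1
--         else: right_cnt += 1
--         if left_cnt == right_cnt:
--             return p[:idx+1], p[idx+1:]
--
-- def check(u):
--     tmp_list = []
--     for p in u:
--         if p == '(':
--             tmp_list.append(p)
--         else: #p == )
--             if not tmp_list:
--                 return False
--             else: tmp_list.pop()
--     return True
--
-- def solution(p):
--     if not p: #1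
--         return ""
--     #2 균형잡힌 , 문자열
--     u, v = divide(p)
--     if check(u):
--         return u + solution(v)
--     else:
--         answer = "".join('(')
--         answer += solution(v)
--         answer += ')'
--         for k in u[1:len(u)-1]:
--             if k == '(':
--                 answer += ')'
--             else:
--                 answer += '('
--
--     return answer
-- ===== SOURCE B (Python) =====
-- def _correct(u):
--     bal = 0
--     for c in u:
--         bal += 1 if c == '(' else -1
--         if bal < 0:
--             return False
--     return True
--
-- def solution(p):
--     # collect every leading balanced chunk, then fold them right-to-left
--     chunks = []
--     s = p
--     while s:
--         bal = 0
--         cut = None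
--         for i, c in enumerate(s):
--             bal += 1 if c == '(' else -1
--             if bal == 0:
--                 cut = i + 1
--                 break
--         if cut is None:
--             # no balanced prefix: the input is not a balanced string (the problem
--             # guarantees one); without this the loop could make no progress
--             raise ValueError("input has no balanced prefix")
--         chunks.append(s[:cut])
--         s = s[cut:]
--     acc = ""
--     for u in reversed(chunks):
--         if _correct(u):
--             acc = u + acc
--         else:
--             acc = "(" + acc + ")" + "".join(')' if k == '(' else '(' for k in u[1:-1])
--     return acc
-- ===== Notes on version B (the rewrite author's own statement) =====
-- stated objective: alternative
-- what changed: Replaces A's suffix recursion with an explicit iterative collection of all leading balanced chunks followed by a right-to-left fold, and replaces the stack-based correctness check with a single balance counter that fails when it goes negative.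
import Mathlib
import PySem

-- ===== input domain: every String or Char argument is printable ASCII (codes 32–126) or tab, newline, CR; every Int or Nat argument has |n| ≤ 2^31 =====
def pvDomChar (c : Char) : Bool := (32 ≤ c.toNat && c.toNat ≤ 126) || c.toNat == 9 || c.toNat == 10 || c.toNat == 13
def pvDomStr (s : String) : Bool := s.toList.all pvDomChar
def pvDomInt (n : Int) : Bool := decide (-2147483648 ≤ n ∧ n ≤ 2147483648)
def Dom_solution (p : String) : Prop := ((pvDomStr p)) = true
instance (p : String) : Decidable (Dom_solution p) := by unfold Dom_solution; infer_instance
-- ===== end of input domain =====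

-- A = KAKAO 2020 "correct parentheses" transformation (suffix recursion, stack-based check);
-- B = collect all leading balanced chunks iteratively, then fold them right-to-left with a
-- balance-counter check.  Equivalence is proved on Pre_ (A raises TypeError elsewhere).


-- ===== PORT A =====
-- divide's `for idx, value in enumerate(p)` loop: `rem` is the part of p not yet visited,
-- `idx` the enumerate counter; two counters, returns (p[:idx+1], p[idx+1:]) at the first
-- index where they meet; falling off the loop (Python: an implicit `return None`) is `none`.
def divideLoop (p : List Char) (rem : List Char) (left right : Int) (idx : Nat) :
    Option (List Char × List Char) :=
  match rem with
  | [] => none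
  | c :: rest =>
    let left' := if c = '(' then left + 1 else left
    let right' := if c = '(' then right else right + 1
    if left' = right' then some (p.take (idx + 1), p.drop (idx + 1))
    else divideLoop p rest left' right' (idx + 1)

-- check's loop: an explicit stack, appending '(' and popping from the end
def checkLoop : List Char → List Char → Bool
  | [], _ => true
  | c :: rest, tmp =>
    if c = '(' then checkLoop rest (tmp ++ [c])
    else if tmp = [] then false else checkLoop rest tmp.dropLast

-- needed by solA's termination
theorem divideLoop_some_lt {p : List Char} {u v : List Char} :
    ∀ {rem : List Char} {l r : Int} {i : Nat},
      divideLoop p rem l r i = some (u, v) → v.length < p.length ∨ p = []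
  | [], _, _, _, h => by exact absurd h (by simp [divideLoop])
  | c :: rest, l, r, i, h => by
    rw [divideLoop] at h
    split at h <;> split at h
    all_goals first
      | (simp only [Option.some.injEq, Prod.mk.injEq] at h
         obtain ⟨-, hv⟩ := h
         subst hv
         by_cases hp0 : p = []
         · exact Or.inr hp0
         · refine Or.inl ?_
           have := List.length_pos_of_ne_nil hp0
           simp only [List.length_drop]
           omega)
      | exact divideLoop_some_lt h

-- solution (A): literal transliteration.  Where Python A raises a TypeError (divide
-- returned None and is unpacked) the port returns [] — those inputs are outside Pre_.
-- u[1:len(u)-1] is ported as (u.drop 1).dropLast, exact for the nonempty u divide yields.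
def solA (p : List Char) : List Char :=
  if p = [] then []
  else
    match h : divideLoop p p 0 0 0 with
    | none => []
    | some (u, v) =>
      if checkLoop u [] then u ++ solA v
      else ((u.drop 1).dropLast).foldl
        (fun a k => a ++ [if k = '(' then ')' else '('])
        (['('] ++ solA v ++ [')'])
termination_by p.length
decreasing_by all_goals
  rcases divideLoop_some_lt h with h1 | h1
  · exact h1
  · rename_i hp _
    exact absurd h1 hp

def solution (p : String) : String := String.ofList (solA p.toList)

-- ===== PORT B =====
-- B's balanced-prefix finder, a `for i, c in enumerate(s)` loop: one running balance,
-- returns the cut index just after the first zero, `none` if the loop finds none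
def firstZero (rem : List Char) (bal : Int) (i : Nat) : Option Nat :=
  match rem with
  | [] => none
  | c :: rest =>
    let b := bal + (if c = '(' then 1 else -1)
    if b = 0 then some (i + 1) else firstZero rest b (i + 1)

-- needed by chunksB's termination
theorem firstZero_some_bounds :
    ∀ {rem : List Char} {bal : Int} {i n : Nat},
      firstZero rem bal i = some n → i < n ∧ n ≤ i + rem.length
  | [], _, _, _, h => by exact absurd h (by simp [firstZero])
  | c :: rest, bal, i, n, h => by
    rw [firstZero] at h
    split at h <;> split at h
    all_goals simp only [List.length_cons]
    all_goals first
      | (simp only [Option.some.injEq] at h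
         omega)
      | (have := firstZero_some_bounds h
         omega)

-- the chunk-collection loop of B: each leading balanced chunk in order
def chunksB (p : List Char) : List (List Char) :=
  if p = [] then []
  else
    match h : firstZero p 0 0 with
    | none => []
    | some n => p.take n :: chunksB (p.drop n)
termination_by p.length
decreasing_by
  have h1 := firstZero_some_bounds h
  simp only [List.length_drop]
  omega

-- B's correctness check: single balance counter, fails as soon as it goes negative
def correctB : List Char → Int → Bool
  | [], _ => true
  | c :: rest, bal =>
    let b := bal + (if c = '(' then 1 else -1)
    if b < 0 then false else correctB rest b

-- the body of B's right-to-left fold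
def combineB (u acc : List Char) : List Char :=
  if correctB u 0 then u ++ acc
  else ['('] ++ acc ++ [')'] ++ ((u.drop 1).dropLast).map (fun k => if k = '(' then ')' else '(')

def solution_alt (p : String) : String := String.ofList ((chunksB p.toList).foldr combineB [])

-- ===== PRECONDITION & SPEC =====
-- Pre_ excludes exactly the strings on which Python A raises (divide returns None at some
-- recursion level and unpacking it raises TypeError): those whose number of '(' differs
-- from the number of other characters.
def Pre_solution (p : String) : Prop := 2 * p.toList.count '(' = p.toList.length
instance (p : String) : Decidable (Pre_solution p) := by unfold Pre_solution; infer_instance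
def pvWitness_solution : String := "(()))("

def Spec_solution (p : String) (out : String) : Prop := out = solution_alt p
instance (p : String) (out : String) : Decidable (Spec_solution p out) := by unfold Spec_solution; infer_instance

-- ===== CLAIM (what is proved, stated in full; the proofs are below) =====
def Claim_equal_solution : Prop := ∀ (p : String), Dom_solution p → Pre_solution p → Spec_solution p (solution p)

-- ===== LEMMAS AND PROOFS =====

-- A's two-counter divide loop computes B's single-balance split of the same string
theorem divideLoop_eq_firstZero (p : List Char) :
    ∀ (rem : List Char) (l r : Int) (i : Nat),
      divideLoop p rem l r i =
        Option.map (fun n => (p.take n, p.drop n)) (firstZero rem (l - r) i)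
  | [], _, _, _ => rfl
  | c :: rest, l, r, i => by
    rw [divideLoop, firstZero]
    by_cases hc : c = '('
    · subst hc
      simp only [reduceIte]
      by_cases he : l + 1 = r
      · rw [if_pos he, if_pos (by omega : (l - r + 1 : Int) = 0)]
        rfl
      · rw [if_neg he, if_neg (by omega : ¬ (l - r + 1 : Int) = 0),
          divideLoop_eq_firstZero p rest (l + 1) r (i + 1)]
        congr 2
        omega
    · simp only [if_neg hc]
      by_cases he : l = r + 1
      · rw [if_pos he, if_pos (by omega : (l - r + -1 : Int) = 0)]
        rfl
      · rw [if_neg he, if_neg (by omega : ¬ (l - r + -1 : Int) = 0),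
          divideLoop_eq_firstZero p rest l (r + 1) (i + 1)]
        congr 2
        omega

-- one-step equation for B's balance check (structural, so this is definitional)
theorem correctB_cons (c : Char) (rest : List Char) (bal : Int) :
    correctB (c :: rest) bal =
      if bal + (if c = '(' then 1 else -1) < 0 then false
      else correctB rest (bal + (if c = '(' then 1 else -1)) := rfl

-- A's stack-based check equals B's balance-counter check: the stack holds only '(',
-- so its length is exactly the running balance
theorem checkLoop_eq_correctB : ∀ (u tmp : List Char),
    checkLoop u tmp = correctB u (tmp.length : Int)
  | [], _ => rfl
  | c :: rest, tmp => by
    rw [correctB_cons]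
    by_cases hc : c = '('
    · rw [if_neg (by simp [hc]; omega)]
      rw [show checkLoop (c :: rest) tmp = checkLoop rest (tmp ++ [c]) from by
        simp [checkLoop, hc]]
      rw [checkLoop_eq_correctB rest (tmp ++ [c])]
      congr 1
      simp [hc]
    · by_cases ht : tmp = []
      · subst ht
        rw [if_pos (by simp [hc])]
        simp [checkLoop, hc]
      · rw [if_neg (by have := List.length_pos_of_ne_nil ht; simp [hc]; omega)]
        rw [show checkLoop (c :: rest) tmp = checkLoop rest tmp.dropLast from by
          simp [checkLoop, hc, ht]]
        rw [checkLoop_eq_correctB rest tmp.dropLast]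
        congr 1
        have := List.length_pos_of_ne_nil ht
        simp [hc, List.length_dropLast]
        omega

-- A's character-appending flip loop is B's map
theorem foldl_append_map (f : Char → Char) :
    ∀ (l : List Char) (acc : List Char),
      l.foldl (fun a k => a ++ [f k]) acc = acc ++ l.map f := by
  intro l
  induction l with
  | nil => simp
  | cons c rest ih => intro acc; simp [List.foldl, ih, List.append_assoc]

-- the main equivalence: A's recursion computes B's right-to-left fold over the chunk list
theorem solA_eq_foldr (p : List Char) : solA p = (chunksB p).foldr combineB [] := by
  fun_induction solA p with
  | case1 =>
      simp [chunksB]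
  | case2 =>
      rename_i p hp hdiv
      rw [divideLoop_eq_firstZero, show (0 : Int) - 0 = 0 by ring] at hdiv
      rw [chunksB, if_neg hp]
      split
      · rfl
      · rename_i n hz
        rw [hz] at hdiv
        exact absurd hdiv (by simp)
  | case3 =>
      rename_i p hp u v hdiv hch ih
      rw [divideLoop_eq_firstZero, show (0 : Int) - 0 = 0 by ring] at hdiv
      rw [chunksB, if_neg hp]
      split
      · rename_i hz
        rw [hz] at hdiv
        exact absurd hdiv (by simp)
      · rename_i n hz
        rw [hz] at hdiv
        simp only [Option.map_some, Option.some.injEq, Prod.mk.injEq] at hdiv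
        obtain ⟨hu, hv⟩ := hdiv
        subst hu
        subst hv
        rw [List.foldr_cons, combineB]
        have hc : correctB (p.take n) 0 = true := by
          have h0 := checkLoop_eq_correctB (p.take n) []
          simp only [List.length_nil, Nat.cast_zero] at h0
          rw [← h0]
          exact hch
        rw [if_pos hc, ih]
  | case4 =>
      rename_i p hp u v hdiv hch ih
      rw [divideLoop_eq_firstZero, show (0 : Int) - 0 = 0 by ring] at hdiv
      rw [chunksB, if_neg hp]
      split
      · rename_i hz
        rw [hz] at hdiv
        exact absurd hdiv (by simp)
      · rename_i n hz
        rw [hz] at hdiv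
        simp only [Option.map_some, Option.some.injEq, Prod.mk.injEq] at hdiv
        obtain ⟨hu, hv⟩ := hdiv
        subst hu
        subst hv
        rw [List.foldr_cons, combineB]
        have hc : ¬ correctB (p.take n) 0 = true := by
          have h0 := checkLoop_eq_correctB (p.take n) []
          simp only [List.length_nil, Nat.cast_zero] at h0
          rw [← h0]
          exact hch
        rw [if_neg hc, ih, foldl_append_map]

-- ===== VERDICT (by name: the statement is the Claim_ definition above) =====
theorem solution_spec : Claim_equal_solution := by
  intro p _ _
  unfold Spec_solution solution solution_alt
  rw [solA_eq_foldr]
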